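-- pv_equiv track=rewrite | github.com/lxPolion/lin.nvim | getcolors.py | retrieve_integer
-- ===== SOURCE A (Python) =====
-- def retrieve_integer(s):
--     i = 0
--     result = None
--     while i < len(s):
--         c = s[i]
--         i += 1
--         if c.isdigit():
--             if result is None:
--                 result = c
--             else:
--                 result = result + c
--         else:
--             if result is None:
--                 continue
--             else:
--                 return int(result)
--     assert False
-- ===== SOURCE B (Python) =====
-- def retrieve_integer(s):
--     # find boundaries of the first digit run, then convert one slice
--     i = 0
--     while i < len(s) and not s[i].isdigit():
--         i += 1
--     j = i
--     while j < len(s) and s[j].isdigit():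
--         j += 1
--     assert i < j and j < len(s)
--     return int(s[i:j])
-- ===== Notes on version B (the rewrite author's own statement) =====
-- stated objective: simpler
-- what changed: Instead of a one-pass state machine that grows an Optional string accumulator character by character and returns from inside the loop, B computes the two boundary indices of the first digit run (skip-non-digits scan, then extend-run scan) and converts one slice s[i:j] with a single int() call.
import Mathlib
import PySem

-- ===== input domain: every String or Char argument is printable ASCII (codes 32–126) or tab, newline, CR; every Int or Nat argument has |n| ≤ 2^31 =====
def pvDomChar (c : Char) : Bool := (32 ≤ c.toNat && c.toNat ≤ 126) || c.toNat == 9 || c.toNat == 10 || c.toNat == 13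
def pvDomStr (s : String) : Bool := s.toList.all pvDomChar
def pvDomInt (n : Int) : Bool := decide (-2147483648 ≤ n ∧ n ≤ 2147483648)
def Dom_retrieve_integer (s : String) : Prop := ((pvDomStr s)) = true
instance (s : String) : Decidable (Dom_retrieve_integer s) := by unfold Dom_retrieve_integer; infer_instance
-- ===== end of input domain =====

-- B replaces A's one-pass Optional-accumulator state machine by two boundary scans plus one slice+int; return values proved equal on Pre_.

-- ===== PORT A =====
-- A's while loop over index i with state result : Option str, transcribed as structural
-- recursion over the remaining characters with the same Option accumulator.
-- The final 'assert False' (AssertionError) is excluded by Pre_; the port returns 0 there.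
def retrieve_integer_goA : List Char → Option (List Char) → Int
  | [], _ => 0  -- assert False
  | c :: cs, result =>
    if PySem.Chars.isdigit c then
      match result with
      | none => retrieve_integer_goA cs (some [c])
      | some r => retrieve_integer_goA cs (some (r ++ [c]))
    else
      match result with
      | none => retrieve_integer_goA cs none
      | some r => (PySem.Int.ofChars? r).getD 0  -- int(result): always a nonempty digit run, never raises

def retrieve_integer (s : String) : Int := retrieve_integer_goA s.toList none

-- ===== PORT B =====
-- first while loop of B: advance i while i < len(s) and not s[i].isdigit()
def retrieve_integer_scan1 (cs : List Char) (i : Nat) : Nat :=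
  if h : i < cs.length then
    if PySem.Chars.isdigit cs[i] then i else retrieve_integer_scan1 cs (i + 1)
  else i
termination_by cs.length - i
decreasing_by omega

-- second while loop of B: advance j while j < len(s) and s[j].isdigit()
def retrieve_integer_scan2 (cs : List Char) (j : Nat) : Nat :=
  if h : j < cs.length then
    if PySem.Chars.isdigit cs[j] then retrieve_integer_scan2 cs (j + 1) else j
  else j
termination_by cs.length - j
decreasing_by omega

def retrieve_integer_alt (s : String) : Int :=
  if retrieve_integer_scan1 s.toList 0 < retrieve_integer_scan2 s.toList (retrieve_integer_scan1 s.toList 0)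
      ∧ retrieve_integer_scan2 s.toList (retrieve_integer_scan1 s.toList 0) < s.toList.length then
    -- int(s[i:j]); the assert's failure (outside Pre_) makes the port return 0
    (PySem.Int.ofChars? (PySem.List.slice s.toList
        (some (retrieve_integer_scan1 s.toList 0 : Int))
        (some (retrieve_integer_scan2 s.toList (retrieve_integer_scan1 s.toList 0) : Int)))).getD 0
  else 0

-- ===== PRECONDITION & SPEC =====
-- Pre_: s contains a digit and the first maximal digit run is followed by a further
-- character; on all other inputs BOTH programs raise AssertionError ('assert False' in A,
-- the assert in B), so nothing is excluded on which A returns.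
def Pre_retrieve_integer (s : String) : Prop :=
  let rest := s.toList.dropWhile (fun c => !PySem.Chars.isdigit c)
  rest ≠ [] ∧ (rest.takeWhile PySem.Chars.isdigit).length < rest.length
instance (s : String) : Decidable (Pre_retrieve_integer s) := by unfold Pre_retrieve_integer; infer_instance
def pvWitness_retrieve_integer : String := "a12b"

def Spec_retrieve_integer (s : String) (out : Int) : Prop := out = retrieve_integer_alt s
instance (s : String) (out : Int) : Decidable (Spec_retrieve_integer s out) := by unfold Spec_retrieve_integer; infer_instance

-- ===== CLAIM (what is proved, stated in full; the proofs are below) =====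
def Claim_equal_retrieve_integer : Prop := ∀ (s : String), Dom_retrieve_integer s → Pre_retrieve_integer s → Spec_retrieve_integer s (retrieve_integer s)

-- ===== LEMMAS AND PROOFS =====

-- A's loop with result = None skips the non-digit prefix
theorem goA_skip (l : List Char) :
    retrieve_integer_goA l none
      = retrieve_integer_goA (l.dropWhile (fun c => !PySem.Chars.isdigit c)) none := by
  induction l with
  | nil => rfl
  | cons c cs ih =>
      by_cases h : PySem.Chars.isdigit c
      · simp [List.dropWhile, h]
      · simp [retrieve_integer_goA, List.dropWhile, h, ih]

-- A's loop with result = some r: accumulate the digit run, then int it (or 0 = assert False at end)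
theorem goA_acc (l : List Char) (r : List Char) :
    retrieve_integer_goA l (some r)
      = if l.dropWhile PySem.Chars.isdigit = [] then 0
        else (PySem.Int.ofChars? (r ++ l.takeWhile PySem.Chars.isdigit)).getD 0 := by
  induction l generalizing r with
  | nil => rfl
  | cons c cs ih =>
      by_cases h : PySem.Chars.isdigit c
      · simp [retrieve_integer_goA, h, List.dropWhile, List.takeWhile, ih]
      · simp [retrieve_integer_goA, h, List.dropWhile, List.takeWhile]

-- the head of dropWhile fails the predicate
theorem dropWhile_head_false {α : Type} (p : α → Bool) :
    ∀ (l : List α) (c : α) (cs : List α), l.dropWhile p = c :: cs → p c = false := by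
  intro l
  induction l with
  | nil => intro c cs h; simp [List.dropWhile] at h
  | cons a as ih =>
      intro c cs h
      rw [List.dropWhile] at h
      by_cases ha : p a
      · simp [ha] at h; exact ih c cs h
      · simp [ha] at h
        rw [← h.1]; simpa using ha

-- drop/take by the takeWhile length
theorem drop_takeWhile_length {α : Type} (p : α → Bool) :
    ∀ l : List α, l.drop (l.takeWhile p).length = l.dropWhile p := by
  intro l
  induction l with
  | nil => rfl
  | cons a as ih => by_cases h : p a <;> simp [List.takeWhile, List.dropWhile, h, ih]

theorem take_takeWhile_length {α : Type} (p : α → Bool) :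
    ∀ l : List α, l.take (l.takeWhile p).length = l.takeWhile p := by
  intro l
  induction l with
  | nil => rfl
  | cons a as ih => by_cases h : p a <;> simp [List.takeWhile, h, ih]

-- B's first scan = index past the non-digit prefix (fuel-indexed induction)
theorem scan1_eq_aux (n : Nat) : ∀ (cs : List Char) (i : Nat), cs.length ≤ i + n →
    retrieve_integer_scan1 cs i
      = i + ((cs.drop i).takeWhile (fun c => !PySem.Chars.isdigit c)).length := by
  induction n with
  | zero =>
      intro cs i h
      rw [retrieve_integer_scan1, dif_neg (by omega)]
      simp [List.drop_eq_nil_of_le (by omega : cs.length ≤ i)]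
  | succ n ih =>
      intro cs i h
      rw [retrieve_integer_scan1]
      by_cases hi : i < cs.length
      · rw [dif_pos hi]
        by_cases hd : PySem.Chars.isdigit cs[i]
        · rw [if_pos hd, List.drop_eq_getElem_cons hi, List.takeWhile]
          simp [hd]
        · rw [if_neg hd, ih cs (i + 1) (by omega), List.drop_eq_getElem_cons hi, List.takeWhile]
          simp [hd]; omega
      · rw [dif_neg hi]
        simp [List.drop_eq_nil_of_le (Nat.le_of_not_lt hi)]

theorem scan1_eq (cs : List Char) (i : Nat) :
    retrieve_integer_scan1 cs i
      = i + ((cs.drop i).takeWhile (fun c => !PySem.Chars.isdigit c)).length :=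
  scan1_eq_aux cs.length cs i (by omega)

-- B's second scan = index past the digit run
theorem scan2_eq_aux (n : Nat) : ∀ (cs : List Char) (j : Nat), cs.length ≤ j + n →
    retrieve_integer_scan2 cs j
      = j + ((cs.drop j).takeWhile PySem.Chars.isdigit).length := by
  induction n with
  | zero =>
      intro cs j h
      rw [retrieve_integer_scan2, dif_neg (by omega)]
      simp [List.drop_eq_nil_of_le (by omega : cs.length ≤ j)]
  | succ n ih =>
      intro cs j h
      rw [retrieve_integer_scan2]
      by_cases hj : j < cs.length
      · rw [dif_pos hj]
        by_cases hd : PySem.Chars.isdigit cs[j]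
        · rw [if_pos hd, ih cs (j + 1) (by omega), List.drop_eq_getElem_cons hj, List.takeWhile]
          simp [hd]; omega
        · rw [if_neg hd, List.drop_eq_getElem_cons hj, List.takeWhile]
          simp [hd]
      · rw [dif_neg hj]
        simp [List.drop_eq_nil_of_le (Nat.le_of_not_lt hj)]

theorem scan2_eq (cs : List Char) (j : Nat) :
    retrieve_integer_scan2 cs j
      = j + ((cs.drop j).takeWhile PySem.Chars.isdigit).length :=
  scan2_eq_aux cs.length cs j (by omega)

-- ===== VERDICT (by name: the statement is the Claim_ definition above) =====
theorem retrieve_integer_spec : Claim_equal_retrieve_integer := by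
  intro s _ hpre
  simp only [Pre_retrieve_integer] at hpre
  obtain ⟨hne, hlt⟩ := hpre
  unfold Spec_retrieve_integer retrieve_integer retrieve_integer_alt
  obtain ⟨c, cs, hcons⟩ := List.exists_cons_of_ne_nil hne
  have hcdig : PySem.Chars.isdigit c = true := by
    have := dropWhile_head_false (fun c => !PySem.Chars.isdigit c) s.toList c cs hcons
    simpa using this
  have hdrop := drop_takeWhile_length (fun c => !PySem.Chars.isdigit c) s.toList
  have h1 : retrieve_integer_scan1 s.toList 0
      = (s.toList.takeWhile (fun c => !PySem.Chars.isdigit c)).length := by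
    rw [scan1_eq]; simp
  have h2 : retrieve_integer_scan2 s.toList
        ((s.toList.takeWhile (fun c => !PySem.Chars.isdigit c)).length)
      = (s.toList.takeWhile (fun c => !PySem.Chars.isdigit c)).length
        + ((s.toList.dropWhile (fun c => !PySem.Chars.isdigit c)).takeWhile PySem.Chars.isdigit).length := by
    rw [scan2_eq, hdrop]
  have hlen : (s.toList.takeWhile (fun c => !PySem.Chars.isdigit c)).length
      + (s.toList.dropWhile (fun c => !PySem.Chars.isdigit c)).length = s.toList.length := by
    conv_rhs => rw [← List.takeWhile_append_dropWhile
      (p := fun c => !PySem.Chars.isdigit c) (l := s.toList)]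
    rw [List.length_append]
  have hdne : ((s.toList.dropWhile (fun c => !PySem.Chars.isdigit c)).takeWhile PySem.Chars.isdigit) ≠ [] := by
    rw [hcons, List.takeWhile]; simp [hcdig]
  rw [h1, h2]
  have hcond : (s.toList.takeWhile (fun c => !PySem.Chars.isdigit c)).length
      < (s.toList.takeWhile (fun c => !PySem.Chars.isdigit c)).length
        + ((s.toList.dropWhile (fun c => !PySem.Chars.isdigit c)).takeWhile PySem.Chars.isdigit).length
      ∧ (s.toList.takeWhile (fun c => !PySem.Chars.isdigit c)).length
        + ((s.toList.dropWhile (fun c => !PySem.Chars.isdigit c)).takeWhile PySem.Chars.isdigit).length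
        < s.toList.length := by
    have := List.length_pos_iff.mpr hdne
    omega
  rw [if_pos hcond]
  -- the slice is exactly the digit run
  have hslice : PySem.List.slice s.toList
      (some ((s.toList.takeWhile (fun c => !PySem.Chars.isdigit c)).length : Int))
      (some (((s.toList.takeWhile (fun c => !PySem.Chars.isdigit c)).length
        + ((s.toList.dropWhile (fun c => !PySem.Chars.isdigit c)).takeWhile PySem.Chars.isdigit).length : Nat) : Int))
      = (s.toList.dropWhile (fun c => !PySem.Chars.isdigit c)).takeWhile PySem.Chars.isdigit := by
    rw [PySem.List.slice_natCast, hdrop, Nat.add_sub_cancel_left,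
      take_takeWhile_length]
  rw [hslice]
  -- A's side
  rw [goA_skip, hcons]
  have hstep : retrieve_integer_goA (c :: cs) none = retrieve_integer_goA cs (some [c]) := by
    simp [retrieve_integer_goA, hcdig]
  rw [hstep, goA_acc]
  have hdw : cs.dropWhile PySem.Chars.isdigit ≠ [] := by
    intro hnil
    have heq : (c :: cs).takeWhile PySem.Chars.isdigit = c :: cs := by
      have := List.takeWhile_append_dropWhile (p := PySem.Chars.isdigit) (l := c :: cs)
      rw [List.dropWhile] at this
      simp only [hcdig] at this
      simpa [hnil] using this
    rw [hcons, heq] at hlt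
    simp at hlt
  rw [if_neg hdw]
  have hexp : List.takeWhile PySem.Chars.isdigit (c :: cs)
      = [c] ++ List.takeWhile PySem.Chars.isdigit cs := by
    rw [List.takeWhile]; simp [hcdig]
  rw [hexp]
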